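-- pv_equiv track=rewrite | github.com/jujumilk3/algorithm-study | Programmers/level0/치킨-쿠폰.py | solution
-- ===== SOURCE A (Python) =====
-- def solution(chicken):
--     answer = 0
--     idx = 0
--     while chicken:
--         idx += 1
--         chicken -= 1
--         if idx % 10 == 0:
--             chicken += 1
--             answer += 1
--     return answer
-- ===== SOURCE B (Python) =====
-- def solution(chicken):
--     # Closed form: the total eaten is chicken + answer and answer = (chicken + answer) // 10,
--     # whose unique solution for chicken >= 1 is (chicken - 1) // 9.
--     if chicken <= 0:
--         return 0
--     return (chicken - 1) // 9
-- ===== Notes on version B (the rewrite author's own statement) =====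
-- stated objective: faster
-- what changed: Replaces the step-by-step coupon simulation loop with the closed-form answer (chicken-1)//9 derived from answer=(chicken+answer)//10; Pre_ excludes negative chicken, where A loops forever.
import Mathlib
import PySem

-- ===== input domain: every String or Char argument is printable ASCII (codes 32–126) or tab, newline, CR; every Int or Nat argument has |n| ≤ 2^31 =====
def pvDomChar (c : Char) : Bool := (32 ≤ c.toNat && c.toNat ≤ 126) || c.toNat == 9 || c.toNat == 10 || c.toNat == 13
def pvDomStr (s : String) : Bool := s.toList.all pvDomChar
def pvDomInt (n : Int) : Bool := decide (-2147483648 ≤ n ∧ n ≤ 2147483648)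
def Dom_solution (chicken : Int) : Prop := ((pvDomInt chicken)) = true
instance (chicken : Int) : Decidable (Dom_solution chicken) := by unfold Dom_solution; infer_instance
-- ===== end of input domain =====

-- B replaces A's O(n) coupon-simulation loop with the O(1) closed form (chicken-1)//9.

-- ===== PORT A =====
-- A's `while chicken:` loop, step for step (same guard, same updates). The fuel
-- parameter only makes the recursion total: on 0 ≤ chicken (Pre_) the loop runs at
-- most 2*chicken steps, so fuel 2*chicken+1 is never exhausted; for negative chicken
-- Python A never terminates (outside Pre_).
def solutionLoop : Nat → Int → Int → Int → Int
  | 0, _, _, answer => answer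
  | fuel + 1, chicken, idx, answer =>
    if chicken ≠ 0 then
      if (idx + 1) % 10 = 0 then
        solutionLoop fuel (chicken - 1 + 1) (idx + 1) (answer + 1)
      else
        solutionLoop fuel (chicken - 1) (idx + 1) answer
    else answer

def solution (chicken : Int) : Int :=
  solutionLoop (2 * chicken.toNat + 1) chicken 0 0

-- ===== PORT B =====
def solution_alt (chicken : Int) : Int :=
  if chicken ≤ 0 then 0
  else PySem.Int.floordiv (chicken - 1) 9

-- ===== PRECONDITION & SPEC =====
-- Pre_ excludes negative chicken: Python A's `while chicken:` never terminates there
-- (chicken only moves further below 0).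
def Pre_solution (chicken : Int) : Prop := 0 ≤ chicken
instance (chicken : Int) : Decidable (Pre_solution chicken) := by unfold Pre_solution; infer_instance
def pvWitness_solution : Int := (25)

def Spec_solution (chicken : Int) (out : Int) : Prop := out = solution_alt chicken
instance (chicken : Int) (out : Int) : Decidable (Spec_solution chicken out) := by unfold Spec_solution; infer_instance

-- ===== CLAIM (what is proved, stated in full; the proofs are below) =====
def Claim_equal_solution : Prop := ∀ (chicken : Int), Dom_solution chicken → Pre_solution chicken → Spec_solution chicken (solution chicken)

-- ===== LEMMAS AND PROOFS =====

-- Coupons still to be earned from loop state (chicken, idx) with r = idx % 10.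
def pvCoupons (c r : Int) : Int := if c ≤ 0 then 0 else (c + r - 1) / 9

-- Loop invariant: from state (c, idx, ans), 0 ≤ c, with enough fuel for the
-- remaining c + pvCoupons steps, the loop returns ans + pvCoupons c (idx % 10).
theorem solutionLoop_closed (fuel : Nat) : ∀ (c idx ans : Int), 0 ≤ c →
    c + pvCoupons c (idx % 10) ≤ (fuel : Int) →
    solutionLoop fuel c idx ans = ans + pvCoupons c (idx % 10) := by
  induction fuel with
  | zero =>
    intro c idx ans hc hf
    unfold pvCoupons at hf ⊢
    by_cases h0 : c ≤ 0
    · simp only [if_pos h0, solutionLoop]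
      omega
    · exfalso
      simp only [if_neg h0, Nat.cast_zero] at hf
      omega
  | succ n ih =>
    intro c idx ans hc hf
    by_cases h0 : c = 0
    · simp [solutionLoop, h0, pvCoupons]
    · have hcn : ¬ c ≤ 0 := by omega
      simp only [solutionLoop, if_pos (show c ≠ 0 from h0)]
      by_cases hm : (idx + 1) % 10 = 0
      · rw [if_pos hm]
        have hco : c - 1 + 1 = c := by ring
        rw [hco, ih c (idx + 1) (ans + 1) hc (by unfold pvCoupons at hf ⊢; simp only [if_neg hcn] at hf ⊢; push_cast at hf ⊢; omega)]
        unfold pvCoupons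
        simp only [if_neg hcn, hm]
        omega
      · rw [if_neg hm]
        rw [ih (c - 1) (idx + 1) ans (by omega) (by unfold pvCoupons at hf ⊢; split_ifs at hf ⊢ <;> push_cast at hf ⊢ <;> omega)]
        unfold pvCoupons
        simp only [if_neg hcn]
        split_ifs with h1
        · omega
        · omega

-- ===== VERDICT (by name: the statement is the Claim_ definition above) =====
theorem solution_spec : Claim_equal_solution := by
  intro chicken _ hpre
  unfold Spec_solution solution solution_alt
  rw [solutionLoop_closed (2 * chicken.toNat + 1) chicken 0 0 hpre
    (by unfold pvCoupons; split_ifs <;> push_cast <;> omega)]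
  unfold pvCoupons
  by_cases h0 : chicken ≤ 0
  · simp [h0]
  · rw [PySem.Int.floordiv_eq_ediv_of_pos (by norm_num : (0:Int) < 9)]
    simp only [if_neg h0]
    omega
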